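-- pv_equiv track=rewrite | github.com/tawhid-k/python-practice | 1st Round/5th Phase/220/Task2.py | hashCode
-- ===== SOURCE A (Python) =====
-- vowel = 'AEIOU'
--
-- def hashCode(s):
--     consonants = 0
--     sumOfDigits = 0
--     for i in s:
--         if i >= 'A' and i <= 'Z' and i not in vowel:
--             consonants += 1
--         elif i >= '0' and i <= '9':
--             sumOfDigits += int(i)
--     code = (consonants * 24 + sumOfDigits) % 9
--     return code
-- ===== SOURCE B (Python) =====
-- vowel = 'AEIOU'
--
-- def hashCode(s):
--     # Build a character frequency table first, then do one weighted pass
--     # over the distinct characters.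
--     cnt = {}
--     for ch in s:
--         cnt[ch] = cnt.get(ch, 0) + 1
--     total = 0
--     for ch, n in cnt.items():
--         if ch >= 'A' and ch <= 'Z' and ch not in vowel:
--             total += 24 * n
--         elif ch.isdigit():
--             total += int(ch) * n
--     return total % 9
-- ===== Notes on version B (the rewrite author's own statement) =====
-- stated objective: alternative
-- what changed: B first builds a character frequency table (dict counter) in one pass and then computes the hash as a weighted sum over the distinct (char, count) items (24*count per consonant key, digit*count per digit key), instead of A's per-character accumulation of two counters.
import Mathlib
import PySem

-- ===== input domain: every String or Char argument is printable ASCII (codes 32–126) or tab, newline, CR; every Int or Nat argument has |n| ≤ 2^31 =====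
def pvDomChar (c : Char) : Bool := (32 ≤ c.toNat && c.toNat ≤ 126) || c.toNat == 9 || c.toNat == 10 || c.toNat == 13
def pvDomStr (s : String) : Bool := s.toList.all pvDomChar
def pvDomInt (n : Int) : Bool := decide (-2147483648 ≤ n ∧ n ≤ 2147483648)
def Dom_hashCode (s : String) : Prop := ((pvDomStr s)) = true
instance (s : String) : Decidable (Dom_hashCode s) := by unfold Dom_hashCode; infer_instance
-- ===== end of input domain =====

-- B replaces A's per-character two-counter scan by a frequency-table build followed by a
-- weighted pass over the distinct (char, count) items; same cost, different shape (alternative).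

-- ===== PORT A =====
-- int(i) on a branch-guarded digit character is exactly its code minus 48
def hashCode (s : String) : Int :=
  let r := s.toList.foldl
    (fun (st : Int × Int) i =>
      if 'A' ≤ i ∧ i ≤ 'Z' ∧ ¬ ("AEIOU".toList.contains i = true) then (st.1 + 1, st.2)
      else if '0' ≤ i ∧ i ≤ '9' then (st.1, st.2 + ((i.toNat : Int) - 48))
      else st)
    (0, 0)
  PySem.Int.mod (r.1 * 24 + r.2) 9

-- ===== PORT B =====
-- int(ch) on a branch-guarded digit character is exactly its code minus 48
def hashCode_alt (s : String) : Int :=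
  let cnt := s.toList.foldl (fun (d : PySem.Dict Char Int) ch => d.insert ch (d.getD ch 0 + 1))
    PySem.Dict.empty
  let total := cnt.items.foldl
    (fun (t : Int) p =>
      if 'A' ≤ p.1 ∧ p.1 ≤ 'Z' ∧ ¬ ("AEIOU".toList.contains p.1 = true) then t + 24 * p.2
      else if PySem.Chars.isdigit p.1 then t + ((p.1.toNat : Int) - 48) * p.2
      else t)
    0
  PySem.Int.mod total 9

-- ===== PRECONDITION & SPEC =====
def Spec_hashCode (s : String) (out : Int) : Prop := out = hashCode_alt s
instance (s : String) (out : Int) : Decidable (Spec_hashCode s out) := by unfold Spec_hashCode; infer_instance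

-- ===== CLAIM (what is proved, stated in full; the proofs are below) =====
def Claim_equal_hashCode : Prop := ∀ (s : String), Dom_hashCode s → Spec_hashCode s (hashCode s)

-- ===== LEMMAS AND PROOFS =====

-- per-character weight: 24 for an uppercase consonant, digit value for a digit, else 0
def pvW (c : Char) : Int :=
  if 'A' ≤ c ∧ c ≤ 'Z' ∧ ¬ ("AEIOU".toList.contains c = true) then 24
  else if '0' ≤ c ∧ c ≤ '9' then (c.toNat : Int) - 48
  else 0

lemma isdigit_iff (c : Char) : PySem.Chars.isdigit c = true ↔ ('0' ≤ c ∧ c ≤ '9') := by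
  simp [PySem.Chars.isdigit, Char.le_def]

-- A's fold accumulates exactly the total weight
lemma foldA (l : List Char) : ∀ a b : Int,
    (l.foldl
      (fun (st : Int × Int) i =>
        if 'A' ≤ i ∧ i ≤ 'Z' ∧ ¬ ("AEIOU".toList.contains i = true) then (st.1 + 1, st.2)
        else if '0' ≤ i ∧ i ≤ '9' then (st.1, st.2 + ((i.toNat : Int) - 48))
        else st) (a, b)).1 * 24 +
    (l.foldl
      (fun (st : Int × Int) i =>
        if 'A' ≤ i ∧ i ≤ 'Z' ∧ ¬ ("AEIOU".toList.contains i = true) then (st.1 + 1, st.2)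
        else if '0' ≤ i ∧ i ≤ '9' then (st.1, st.2 + ((i.toNat : Int) - 48))
        else st) (a, b)).2
    = a * 24 + b + (l.map pvW).sum := by
  induction l with
  | nil => intro a b; simp
  | cons x t ih =>
    intro a b
    simp only [List.foldl_cons, List.map_cons, List.sum_cons]
    by_cases h1 : 'A' ≤ x ∧ x ≤ 'Z' ∧ ¬ ("AEIOU".toList.contains x = true)
    · simp only [if_pos h1, pvW, ih]; ring
    · by_cases h2 : '0' ≤ x ∧ x ≤ '9'
      · simp only [if_neg h1, if_pos h2, pvW, ih]; ring
      · simp only [if_neg h1, if_neg h2, pvW, ih]; ring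

-- B's fold over the items is the sum of weight * count
lemma foldB (ps : List (Char × Int)) : ∀ t : Int,
    (ps.foldl
      (fun (t : Int) p =>
        if 'A' ≤ p.1 ∧ p.1 ≤ 'Z' ∧ ¬ ("AEIOU".toList.contains p.1 = true) then t + 24 * p.2
        else if PySem.Chars.isdigit p.1 then t + ((p.1.toNat : Int) - 48) * p.2
        else t) t)
    = t + (ps.map (fun p => pvW p.1 * p.2)).sum := by
  induction ps with
  | nil => intro t; simp
  | cons x l ih =>
    intro t
    simp only [List.foldl_cons, List.map_cons, List.sum_cons]
    by_cases h1 : 'A' ≤ x.1 ∧ x.1 ≤ 'Z' ∧ ¬ ("AEIOU".toList.contains x.1 = true)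
    · simp only [if_pos h1, pvW, ih]; ring
    · by_cases h2 : '0' ≤ x.1 ∧ x.1 ≤ '9'
      · rw [if_neg h1, if_pos ((isdigit_iff x.1).2 h2), ih]
        simp only [pvW, if_neg h1, if_pos h2]; ring
      · rw [if_neg h1, if_neg (by simpa [isdigit_iff] using h2), ih]
        simp only [pvW, if_neg h1, if_neg h2]; ring

-- a sum over a nodup list of the indicator of x picks out pvW x
lemma sum_indicator (K : List Char) (x : Char) (hx : x ∈ K) (hnd : K.Nodup) :
    (K.map (fun k => if k = x then pvW k else 0)).sum = pvW x := by
  induction K with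
  | nil => cases hx
  | cons k K ih =>
    simp only [List.map_cons, List.sum_cons]
    rcases List.nodup_cons.1 hnd with ⟨hk, hnd'⟩
    by_cases hkx : k = x
    · subst hkx
      rw [if_pos rfl]
      have : (K.map (fun k' => if k' = k then pvW k' else 0)).sum = 0 := by
        apply List.sum_eq_zero
        intro y hy
        rcases List.mem_map.1 hy with ⟨z, hz, rfl⟩
        rw [if_neg (by rintro rfl; exact hk hz)]
      rw [this]; ring
    · rw [if_neg hkx, ih (by rcases List.mem_cons.1 hx with h | h; exacts [absurd h.symm hkx, h]) hnd']
      ring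

-- weighted sum over distinct keys with multiplicities = plain sum over the list
lemma weighted_sum (xs : List Char) : ∀ (K : List Char), K.Nodup → (∀ x ∈ xs, x ∈ K) →
    (K.map (fun k => pvW k * (xs.count k : Int))).sum = (xs.map pvW).sum := by
  induction xs with
  | nil => intro K _ _; simp
  | cons x t ih =>
    intro K hnd hsub
    have hx : x ∈ K := hsub x (List.mem_cons_self)
    have step : (K.map (fun k => pvW k * (((x :: t).count k : Nat) : Int))).sum
        = (K.map (fun k => pvW k * (t.count k : Int))).sum
          + (K.map (fun k => if k = x then pvW k else 0)).sum := by
      rw [← List.sum_map_add]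
      apply congrArg
      apply List.map_congr_left
      intro k _
      by_cases hkx : k = x
      · subst hkx
        rw [List.count_cons_self, if_pos rfl]
        push_cast; ring
      · rw [List.count_cons_of_ne (fun h => hkx h.symm), if_neg hkx]
        ring
    rw [step, sum_indicator K x hx hnd, ih K hnd (fun y hy => hsub y (List.mem_cons_of_mem _ hy))]
    simp [add_comm]

-- ===== VERDICT (by name: the statement is the Claim_ definition above) =====
theorem hashCode_spec : Claim_equal_hashCode := by
  intro s _
  unfold Spec_hashCode hashCode hashCode_alt
  rw [PySem.Dict.foldl_insert_getD_add_one_eq_counter]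
  apply congrArg (fun z => PySem.Int.mod z 9)
  rw [foldA, foldB, PySem.Dict.items_counter]
  rw [List.map_map]
  have hnd : (PySem.Set.ofList s.toList).Nodup := PySem.Set.nodup_ofList _
  have hsub : ∀ x ∈ s.toList, x ∈ PySem.Set.ofList s.toList := by
    intro x hx; exact (PySem.Set.mem_ofList _ _).2 hx
  rw [← weighted_sum s.toList (PySem.Set.ofList s.toList) hnd hsub]
  norm_num
  apply congrArg
  apply List.map_congr_left
  intro k _
  rfl
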